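-- pv_equiv track=rewrite | github.com/kalzei/python3 | week3/e1.py | isnum
-- ===== SOURCE A (Python) =====
-- def isnum(n):
-- # tells if n is a number and gives its type
--     if not type(n) is str:
--         return False
--  # ignore everything that isn't string
--     n= n.strip()
-- # identify numbers
--     if n.isdigit():
--         return True
--     elif n[0] in '-+' and isnum(n[1:]):
--         return True
--     else:
--         return False
-- ===== SOURCE B (Python) =====
-- def isnum(n):
--     # a value is a number iff, ignoring surrounding whitespace, it is an
--     # optional single sign followed by one or more digits
--     if type(n) is not str:
--         return False
--     s = n.strip()
--     if s and s[0] in '+-':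
--         s = s[1:]
--     return s.isdigit()
-- ===== Notes on version B (the rewrite author's own statement) =====
-- stated objective: simpler
-- what changed: Replaces A's strip-and-peel recursion with a flat check: strip once, drop at most one leading sign, test isdigit; Pre_ excludes all-sign/whitespace strings on which A raises IndexError, and B deliberately rejects multi-sign strings A accepts (see differs).
-- intended difference: On strings that, after stripping, consist of two or more sign/whitespace characters followed by digits (e.g. '+ 5', '--5'), A returns True because its recursion re-strips and peels signs repeatedly; B returns False, the intended value since such strings are not integer literals. — e.g. on isnum("+ 5"): A returns true, B returns false
import Mathlib
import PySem

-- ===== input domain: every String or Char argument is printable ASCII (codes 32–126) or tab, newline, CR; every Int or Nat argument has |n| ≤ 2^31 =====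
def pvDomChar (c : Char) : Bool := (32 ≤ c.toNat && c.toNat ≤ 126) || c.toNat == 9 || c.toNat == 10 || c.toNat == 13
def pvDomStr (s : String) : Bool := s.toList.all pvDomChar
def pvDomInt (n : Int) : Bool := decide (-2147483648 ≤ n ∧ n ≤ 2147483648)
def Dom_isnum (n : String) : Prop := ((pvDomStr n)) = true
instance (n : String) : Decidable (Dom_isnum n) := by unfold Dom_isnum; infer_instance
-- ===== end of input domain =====

-- B replaces A's strip-and-peel recursion with a flat check (strip, drop at most one
-- leading sign, isdigit); B rejects multi-sign/inner-whitespace strings A accepts (D_)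
-- and returns False where A raises IndexError (excluded by Pre_).

-- ===== PORT A =====
-- A on the char list, with a fuel parameter making the recursion structural
-- (fuel = length+1 never runs out: each recursive call is on a strictly shorter list).
-- n.strip(); isdigit → True; elif n[0] in '-+' and isnum(n[1:]) → True; else False
-- (Python raises IndexError when the stripped string is empty; the port returns false
--  there, excluded by Pre_isnum)
def isnumA : Nat → List Char → Bool
  | 0, _ => false
  | fuel+1, l =>
    let s := PySem.Chars.strip l
    if PySem.Chars.strIsdigit s then true
    else
      match s with
      | c :: rest => if (c = '-' || c = '+') && isnumA fuel rest then true else false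
      | [] => false

def isnum (n : String) : Bool := isnumA (n.toList.length + 1) n.toList

-- ===== PORT B =====
-- s = n.strip(); if s and s[0] in '+-': s = s[1:]; return s.isdigit()
def isnum_alt (n : String) : Bool :=
  let s := PySem.Chars.strip n.toList
  let s' := match s with
            | c :: rest => if c = '+' || c = '-' then rest else c :: rest
            | [] => []
  PySem.Chars.strIsdigit s'

-- ===== PRECONDITION & SPEC =====
-- the sign and whitespace characters of the ASCII input domain
def pvAsciiSW : List Char := ['+', '-', ' ', '\t', '\n', '\r', '\x0b', '\x0c']

-- Pre_ excludes exactly the strings consisting only of sign and whitespace characters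
-- (including the empty string), on which Python A raises IndexError.
def Pre_isnum (n : String) : Prop := (n.toList.any (fun c => !(pvAsciiSW.contains c))) = true
instance (n : String) : Decidable (Pre_isnum n) := by unfold Pre_isnum; infer_instance

def pvWitness_isnum : String := " +12 "

-- On strings that, after stripping, consist of two or more sign/whitespace characters
-- followed by digits (e.g. "+ 5", "--5"), A returns True because its recursion re-strips
-- and peels signs repeatedly; B returns False, the intended value since such strings are
-- not integer literals.
def D_isnum (n : String) : Prop :=
  2 ≤ ((PySem.Chars.strip n.toList).takeWhile (fun c => pvAsciiSW.contains c)).length ∧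
  ((PySem.Chars.strip n.toList).dropWhile (fun c => pvAsciiSW.contains c)) ≠ [] ∧
  (((PySem.Chars.strip n.toList).dropWhile (fun c => pvAsciiSW.contains c)).all PySem.Chars.isdigit) = true
instance (n : String) : Decidable (D_isnum n) := by unfold D_isnum; infer_instance

def Spec_isnum (n : String) (out : Bool) : Prop := ¬ D_isnum n → out = isnum_alt n
instance (n : String) (out : Bool) : Decidable (Spec_isnum n out) := by unfold Spec_isnum; infer_instance

def pvDiffWitness_isnum : String := "+ 5"
def pvDiffWitnessOut_isnum : Bool × Bool := (true, false)

-- ===== CLAIM (what is proved, stated in full; the proofs are below) =====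
def Claim_unchanged_isnum : Prop := ∀ (n : String), Dom_isnum n → Pre_isnum n → Spec_isnum n (isnum n)
def Claim_changed_isnum : Prop := Dom_isnum (pvDiffWitness_isnum) ∧ Pre_isnum (pvDiffWitness_isnum) ∧ D_isnum (pvDiffWitness_isnum) ∧ isnum (pvDiffWitness_isnum) = pvDiffWitnessOut_isnum.1 ∧ isnum_alt (pvDiffWitness_isnum) = pvDiffWitnessOut_isnum.2 ∧ pvDiffWitnessOut_isnum.1 ≠ pvDiffWitnessOut_isnum.2
def Claim_exact_isnum : Prop := ∀ (n : String), Dom_isnum n → Pre_isnum n → D_isnum n → isnum n ≠ isnum_alt n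

-- ===== LEMMAS AND PROOFS =====

-- the semantic sign-or-whitespace predicate (Python's isspace, any sign)
def pvSW (c : Char) : Bool := PySem.Chars.isspace c || c = '+' || c = '-'

-- D_isnum restated through pvSW (equal to D_isnum on the ASCII domain, pv_D_iff below)
def pvDsem (n : String) : Prop :=
  2 ≤ ((PySem.Chars.strip n.toList).takeWhile pvSW).length ∧
  ((PySem.Chars.strip n.toList).dropWhile pvSW) ≠ [] ∧
  (((PySem.Chars.strip n.toList).dropWhile pvSW).all PySem.Chars.isdigit) = true

-- on domain characters the ASCII list and the semantic predicate agree
theorem pv_contains_eq {c : Char} (hc : pvDomChar c = true) :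
    pvAsciiSW.contains c = pvSW c := by
  rw [Bool.eq_iff_iff]
  have hnum : ∀ d : Char, (c = d) ↔ c.toNat = d.toNat :=
    fun d => ⟨fun h => by rw [h], fun h => Char.ext (UInt32.toNat_inj.mp h)⟩
  simp only [pvAsciiSW, pvSW, PySem.Chars.isspace, List.contains_eq_mem, List.mem_cons,
    List.not_mem_nil, or_false, decide_eq_true_eq, Bool.or_eq_true, Bool.and_eq_true,
    hnum]
  simp only [pvDomChar, Bool.or_eq_true, Bool.and_eq_true, beq_iff_eq,
    decide_eq_true_eq] at hc
  simp only [show ('+').toNat = 43 from rfl, show ('-').toNat = 45 from rfl,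
    show (' ').toNat = 32 from rfl, show ('\t').toNat = 9 from rfl,
    show ('\n').toNat = 10 from rfl, show ('\r').toNat = 13 from rfl,
    show ('\x0b').toNat = 11 from rfl, show ('\x0c').toNat = 12 from rfl]
  omega

theorem pv_takeWhile_congr {p q : Char → Bool} {l : List Char}
    (h : ∀ c ∈ l, p c = q c) : l.takeWhile p = l.takeWhile q := by
  induction l with
  | nil => rfl
  | cons c t ih =>
    simp only [List.takeWhile_cons, h c (by simp)]
    split
    · rw [ih (fun x hx => h x (by simp [hx]))]
    · rfl

theorem pv_dropWhile_congr {p q : Char → Bool} {l : List Char}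
    (h : ∀ c ∈ l, p c = q c) : l.dropWhile p = l.dropWhile q := by
  induction l with
  | nil => rfl
  | cons c t ih =>
    simp only [List.dropWhile_cons, h c (by simp)]
    split
    · exact ih (fun x hx => h x (by simp [hx]))
    · rfl

-- stripping yields a sublist, so its characters stay in the original list
theorem pv_strip_sublist (l : List Char) : (PySem.Chars.strip l).Sublist l := by
  unfold PySem.Chars.strip PySem.Chars.rstrip PySem.Chars.lstrip
  have h1 : (List.dropWhile PySem.Chars.isspace l).Sublist l := List.dropWhile_sublist _
  have h2 := (List.dropWhile_sublist
      (l := (List.dropWhile PySem.Chars.isspace l).reverse) (p := PySem.Chars.isspace)).reverse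
  simp only [List.reverse_reverse] at h2
  exact h2.trans h1

-- on the ASCII domain, D_isnum coincides with its semantic restatement
theorem pv_D_iff (n : String) (hdom : Dom_isnum n) : D_isnum n ↔ pvDsem n := by
  have hd : ∀ c ∈ n.toList, pvDomChar c = true := by
    unfold Dom_isnum pvDomStr at hdom
    simpa [List.all_eq_true] using hdom
  have hco : ∀ c ∈ PySem.Chars.strip n.toList, (fun c => pvAsciiSW.contains c) c = pvSW c :=
    fun c hc => pv_contains_eq (hd c ((pv_strip_sublist n.toList).subset hc))
  unfold D_isnum pvDsem
  rw [pv_takeWhile_congr hco, pv_dropWhile_congr hco]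

-- stripping never lengthens a string
theorem pvStrip_len_le (l : List Char) : (PySem.Chars.strip l).length ≤ l.length := by
  unfold PySem.Chars.strip PySem.Chars.rstrip PySem.Chars.lstrip
  have h1 := List.length_dropWhile_le (p := PySem.Chars.isspace) (l := l)
  have h2 := List.length_dropWhile_le (p := PySem.Chars.isspace)
      (l := (List.dropWhile PySem.Chars.isspace l).reverse)
  simp only [List.length_reverse] at *
  omega

theorem pv_dropWhile_sw_lstrip (l : List Char) :
    l.dropWhile pvSW = (PySem.Chars.lstrip l).dropWhile pvSW := by
  unfold PySem.Chars.lstrip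
  induction l with
  | nil => rfl
  | cons c t ih =>
    by_cases h : PySem.Chars.isspace c = true
    · simp [h, pvSW, ih]
    · rw [List.dropWhile_cons_of_neg (l := t) (a := c) (p := PySem.Chars.isspace) (by simp [h])]

theorem pv_rstrip_append_ws (x w : List Char) (hw : ∀ c ∈ w, PySem.Chars.isspace c = true) :
    PySem.Chars.rstrip (x ++ w) = PySem.Chars.rstrip x := by
  unfold PySem.Chars.rstrip
  rw [List.reverse_append, List.dropWhile_append]
  have hnil : List.dropWhile PySem.Chars.isspace w.reverse = [] := by
    rw [List.dropWhile_eq_nil_iff]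
    intro c hc; exact hw c (List.mem_reverse.mp hc)
  simp [hnil]

-- decomposition x = rstrip x ++ (all-whitespace tail)
theorem pv_rstrip_decomp (x : List Char) :
    ∃ w, x = PySem.Chars.rstrip x ++ w ∧ ∀ c ∈ w, PySem.Chars.isspace c = true := by
  refine ⟨(x.reverse.takeWhile PySem.Chars.isspace).reverse, ?_, ?_⟩
  · unfold PySem.Chars.rstrip
    conv_lhs => rw [← x.reverse_reverse, ← List.takeWhile_append_dropWhile
      (p := PySem.Chars.isspace) (l := x.reverse)]
    rw [List.reverse_append]
  · intro c hc
    rw [List.mem_reverse] at hc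
    exact List.mem_takeWhile_imp hc

theorem pv_head_dropWhile {p : Char → Bool} {l : List Char} {c : Char} {t : List Char}
    (h : l.dropWhile p = c :: t) : p c = false := by
  have := List.head?_dropWhile_not p l
  rw [h] at this
  simpa using this

theorem pv_rstrip_head {x : List Char} {c : Char} {t : List Char}
    (h : PySem.Chars.rstrip x = c :: t) : ∃ t', x = c :: t' := by
  obtain ⟨w, hx, -⟩ := pv_rstrip_decomp x
  rw [h] at hx
  exact ⟨t ++ w, by simpa using hx⟩

-- head of the stripped string is not whitespace
theorem pv_strip_head {l : List Char} {c : Char} {t : List Char}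
    (h : PySem.Chars.strip l = c :: t) : PySem.Chars.isspace c = false := by
  unfold PySem.Chars.strip at h
  obtain ⟨t', ht'⟩ := pv_rstrip_head h
  exact pv_head_dropWhile (p := PySem.Chars.isspace) (show _ from ht')

-- last char of the stripped string is not whitespace
theorem pv_strip_getLast {l s : List Char} (h : PySem.Chars.strip l = s) (hne : s ≠ []) :
    ∃ c, s.getLast? = some c ∧ PySem.Chars.isspace c = false := by
  have hrev : s.reverse = List.dropWhile PySem.Chars.isspace (PySem.Chars.lstrip l).reverse := by
    unfold PySem.Chars.strip PySem.Chars.rstrip at h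
    rw [← h, List.reverse_reverse]
  cases hx : s.reverse with
  | nil =>
    rw [List.reverse_eq_nil_iff] at hx
    exact absurd hx hne
  | cons a t =>
    refine ⟨a, ?_, ?_⟩
    · rw [← List.head?_reverse, hx]; rfl
    · exact pv_head_dropWhile (p := PySem.Chars.isspace)
        (l := (PySem.Chars.lstrip l).reverse) (by rw [← hrev, hx])

-- rstrip is the identity on a list whose last char is not whitespace
theorem pv_rstrip_of_getLast {x : List Char} {c : Char}
    (h : x.getLast? = some c) (hc : PySem.Chars.isspace c = false) :
    PySem.Chars.rstrip x = x := by
  unfold PySem.Chars.rstrip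
  have hrev : x.reverse.head? = some c := by rw [List.head?_reverse, h]
  cases hx : x.reverse with
  | nil => simp [hx] at hrev ⊢
  | cons a t =>
    rw [hx] at hrev
    have : a = c := by simpa using hrev
    subst this
    rw [List.dropWhile_cons_of_neg (by simp [hc]), ← hx, List.reverse_reverse]

-- KEY for A: with enough fuel, A's recursion computes strIsdigit (rstrip (dropWhile pvSW l))
theorem pv_key (f : Nat) (l : List Char) (hf : l.length < f) :
    isnumA f l = PySem.Chars.strIsdigit (PySem.Chars.rstrip (l.dropWhile pvSW)) := by
  induction f generalizing l with
  | zero => omega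
  | succ fuel ih =>
  obtain ⟨w, hls, hw⟩ := pv_rstrip_decomp (PySem.Chars.lstrip l)
  have hstrip : PySem.Chars.strip l = PySem.Chars.rstrip (PySem.Chars.lstrip l) := rfl
  have hdrop : l.dropWhile pvSW = (PySem.Chars.strip l ++ w).dropWhile pvSW := by
    rw [pv_dropWhile_sw_lstrip, hstrip]
    conv_lhs => rw [hls]
  have hrs : PySem.Chars.rstrip (PySem.Chars.strip l) = PySem.Chars.strip l := by
    rw [hstrip]
    unfold PySem.Chars.rstrip
    simp [List.dropWhile_idempotent]
  have hwdrop : w.dropWhile pvSW = [] := by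
    rw [List.dropWhile_eq_nil_iff]
    intro x hx; simp [pvSW, hw x hx]
  rw [isnumA]
  split_ifs with hd
  · obtain ⟨hne, hall⟩ : ¬(PySem.Chars.strip l).isEmpty = true ∧
        ∀ x ∈ PySem.Chars.strip l, PySem.Chars.isdigit x = true := by
      simpa [PySem.Chars.strIsdigit] using hd
    obtain ⟨c, rest, hcs⟩ : ∃ c rest, PySem.Chars.strip l = c :: rest := by
      cases h : PySem.Chars.strip l with
      | nil => rw [h] at hne; simp at hne
      | cons a b => exact ⟨a, b, rfl⟩
    have hcd : PySem.Chars.isdigit c = true := hall c (by simp [hcs])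
    have hcd' : '0' ≤ c ∧ c ≤ '9' := by simpa [PySem.Chars.isdigit] using hcd
    have h48 : 48 ≤ c.toNat := by
      have := hcd'.1; rw [Char.le_def, UInt32.le_iff_toNat_le] at this; exact this
    have h57 : c.toNat ≤ 57 := by
      have := hcd'.2; rw [Char.le_def, UInt32.le_iff_toNat_le] at this; exact this
    have hnsw : pvSW c = false := by
      cases hb : pvSW c with
      | false => rfl
      | true =>
        exfalso
        have hnum : (c = '+') ↔ c.toNat = 43 :=
          ⟨fun h => by rw [h]; rfl, fun h => Char.ext (UInt32.toNat_inj.mp h)⟩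
        have hnum' : (c = '-') ↔ c.toNat = 45 :=
          ⟨fun h => by rw [h]; rfl, fun h => Char.ext (UInt32.toNat_inj.mp h)⟩
        simp only [pvSW, PySem.Chars.isspace, Bool.or_eq_true, Bool.and_eq_true,
          decide_eq_true_eq, hnum, hnum'] at hb
        omega
    rw [hdrop, hcs, List.cons_append,
        List.dropWhile_cons_of_neg (p := pvSW) (a := c) (l := rest ++ w) (by simp [hnsw]),
        ← List.cons_append, ← hcs, pv_rstrip_append_ws _ _ hw, hrs]
    exact hd.symm
  · split
    next c rest h =>
      have hlen : rest.length < fuel := by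
        have h1 := pvStrip_len_le l
        rw [h] at h1; simp at h1; omega
      by_cases hsign : (decide (c = '-') || decide (c = '+')) = true
      · have hcsw : pvSW c = true := by
          unfold pvSW
          rcases Bool.or_eq_true_iff.mp hsign with hx | hx <;>
            rw [decide_eq_true_eq] at hx <;> subst hx <;> decide
        have ihr := ih rest hlen
        have hglr : PySem.Chars.rstrip (l.dropWhile pvSW)
            = PySem.Chars.rstrip (rest.dropWhile pvSW) := by
          rw [hdrop, h, List.cons_append,
              List.dropWhile_cons_of_pos (p := pvSW) (a := c) (l := rest ++ w) hcsw,
              List.dropWhile_append]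
          by_cases hre : (rest.dropWhile pvSW).isEmpty = true
          · rw [if_pos hre, hwdrop, List.isEmpty_iff.mp hre]
          · rw [if_neg hre, pv_rstrip_append_ws _ _ hw]
        rw [hglr, ← ihr]
        cases hA : isnumA fuel rest <;> simp [hsign]
      · have hchead : PySem.Chars.isspace c = false := pv_strip_head h
        have hcsw : pvSW c = false := by
          unfold pvSW
          simp only [Bool.or_eq_true_iff, decide_eq_true_eq] at hsign
          push_neg at hsign
          simp [hchead, hsign.1, hsign.2]
        rw [hdrop, h, List.cons_append,
            List.dropWhile_cons_of_neg (p := pvSW) (a := c) (l := rest ++ w) (by simp [hcsw]),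
            ← List.cons_append, ← h, pv_rstrip_append_ws _ _ hw, hrs]
        simp only [hsign, Bool.false_and]
        simp only [Bool.not_eq_true] at hd
        exact hd.symm
    next h =>
      have hnil : l.dropWhile pvSW = [] := by
        rw [hdrop, h, List.nil_append, hwdrop]
      rw [hnil]
      simp [PySem.Chars.rstrip, PySem.Chars.strIsdigit]

-- A in terms of the stripped string: isnum n = strIsdigit (dropWhile pvSW (strip n))
theorem pv_A_char (n : String) :
    isnum n = PySem.Chars.strIsdigit ((PySem.Chars.strip n.toList).dropWhile pvSW) := by
  set l := n.toList with hl
  rw [isnum, pv_key (l.length + 1) l (by omega)]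
  obtain ⟨w, hls, hw⟩ := pv_rstrip_decomp (PySem.Chars.lstrip l)
  have hstrip : PySem.Chars.strip l = PySem.Chars.rstrip (PySem.Chars.lstrip l) := rfl
  have hdrop : l.dropWhile pvSW = (PySem.Chars.strip l ++ w).dropWhile pvSW := by
    rw [pv_dropWhile_sw_lstrip, hstrip]
    conv_lhs => rw [hls]
  have hwdrop : w.dropWhile pvSW = [] := by
    rw [List.dropWhile_eq_nil_iff]
    intro x hx; simp [pvSW, hw x hx]
  rw [hdrop, List.dropWhile_append]
  by_cases hre : ((PySem.Chars.strip l).dropWhile pvSW).isEmpty = true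
  · rw [if_pos hre, hwdrop, List.isEmpty_iff.mp hre]
    rfl
  · rw [if_neg hre, pv_rstrip_append_ws _ _ hw]
    -- the tail after dropWhile keeps the stripped string's (non-whitespace) last char
    have hne : (PySem.Chars.strip l).dropWhile pvSW ≠ [] := by
      simpa [List.isEmpty_iff] using hre
    have hsne : PySem.Chars.strip l ≠ [] := by
      intro h0; rw [h0] at hne; simp at hne
    obtain ⟨c, hlast, hcns⟩ := pv_strip_getLast (l := l) rfl hsne
    have hsplit := List.takeWhile_append_dropWhile (p := pvSW) (l := PySem.Chars.strip l)
    have hlast' : ((PySem.Chars.strip l).dropWhile pvSW).getLast? = some c := by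
      rw [← hlast]
      conv_rhs => rw [← hsplit]
      exact (List.getLast?_append_of_ne_nil _ hne).symm
    rw [pv_rstrip_of_getLast hlast' hcns]

-- a sign-or-whitespace char is not a digit
theorem pv_sw_not_digit {c : Char} (h : pvSW c = true) : PySem.Chars.isdigit c = false := by
  cases hb : PySem.Chars.isdigit c with
  | false => rfl
  | true =>
    exfalso
    have hcd' : '0' ≤ c ∧ c ≤ '9' := by simpa [PySem.Chars.isdigit] using hb
    have h48 : 48 ≤ c.toNat := by
      have := hcd'.1; rw [Char.le_def, UInt32.le_iff_toNat_le] at this; exact this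
    have h57 : c.toNat ≤ 57 := by
      have := hcd'.2; rw [Char.le_def, UInt32.le_iff_toNat_le] at this; exact this
    have hnum : (c = '+') ↔ c.toNat = 43 :=
      ⟨fun hx => by rw [hx]; rfl, fun hx => Char.ext (UInt32.toNat_inj.mp hx)⟩
    have hnum' : (c = '-') ↔ c.toNat = 45 :=
      ⟨fun hx => by rw [hx]; rfl, fun hx => Char.ext (UInt32.toNat_inj.mp hx)⟩
    simp only [pvSW, PySem.Chars.isspace, Bool.or_eq_true, Bool.and_eq_true,
      decide_eq_true_eq, hnum, hnum'] at h
    omega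

-- strIsdigit is false on a list headed by a sign-or-whitespace char
theorem pv_strIsdigit_sw_head {c : Char} {t : List Char} (h : pvSW c = true) :
    PySem.Chars.strIsdigit (c :: t) = false := by
  simp [PySem.Chars.strIsdigit, pv_sw_not_digit h]

-- the core agreement, by cases on the shape of the stripped string
theorem pv_main (n : String) (hnD : ¬ pvDsem n) : isnum n = isnum_alt n := by
  rw [pv_A_char, isnum_alt]
  cases hs : PySem.Chars.strip n.toList with
  | nil => simp
  | cons c r =>
    have hchead : PySem.Chars.isspace c = false := pv_strip_head hs
    by_cases hsign : (c = '+' ∨ c = '-')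
    · have hcsw : pvSW c = true := by
        unfold pvSW
        rcases hsign with hx | hx <;> subst hx <;> simp
      have hsign' : (decide (c = '+') || decide (c = '-')) = true := by
        rcases hsign with hx | hx <;> simp [hx]
      rw [List.dropWhile_cons_of_pos hcsw]
      simp only [hsign', if_true]
      cases hr : r with
      | nil => simp
      | cons d r' =>
        by_cases hd : pvSW d = true
        · -- D-shaped prefix: both sides are false (A's side by ¬D)
          rw [List.dropWhile_cons_of_pos hd, pv_strIsdigit_sw_head hd]
          cases hA : PySem.Chars.strIsdigit (r'.dropWhile pvSW) with
          | false => rfl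
          | true =>
            exfalso
            apply hnD
            unfold pvDsem
            rw [hs, hr]
            rw [List.dropWhile_cons_of_pos hcsw, List.dropWhile_cons_of_pos hd]
            refine ⟨?_, ?_, ?_⟩
            · rw [List.takeWhile_cons_of_pos hcsw, List.takeWhile_cons_of_pos hd]
              simp
            · intro h0
              rw [h0] at hA
              simp [PySem.Chars.strIsdigit] at hA
            · simp only [PySem.Chars.strIsdigit, Bool.and_eq_true] at hA
              exact hA.2
        · rw [List.dropWhile_cons_of_neg (by simpa using hd)]
    · have hcsw : pvSW c = false := by
        unfold pvSW
        push_neg at hsign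
        simp [hchead, hsign.1, hsign.2]
      have hsign' : (decide (c = '+') || decide (c = '-')) = false := by
        push_neg at hsign
        simp [hsign.1, hsign.2]
      rw [List.dropWhile_cons_of_neg (by simp [hcsw])]
      simp [hsign']

-- inside D, A returns true and B false
theorem pv_D_values (n : String) (hD : pvDsem n) : isnum n = true ∧ isnum_alt n = false := by
  obtain ⟨hpre, hne, hall⟩ := hD
  constructor
  · rw [pv_A_char]
    cases h0 : (PySem.Chars.strip n.toList).dropWhile pvSW with
    | nil => exact absurd h0 hne
    | cons a b =>
      rw [h0] at hall
      simp [PySem.Chars.strIsdigit, List.all_eq_true] at hall ⊢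
      simpa [List.all_eq_true] using hall
  · -- the stripped string starts with two pvSW chars: B peels one sign, then fails isdigit
    rw [isnum_alt]
    cases hs : PySem.Chars.strip n.toList with
    | nil => rw [hs] at hpre; simp at hpre
    | cons c r =>
      rw [hs] at hpre
      cases hr : r with
      | nil =>
        rw [hr] at hpre
        by_cases hc : pvSW c = true <;> simp [List.takeWhile, hc] at hpre
      | cons d r' =>
        rw [hr] at hpre
        have hc : pvSW c = true := by
          by_contra hcf
          rw [List.takeWhile_cons_of_neg (by simpa using hcf)] at hpre
          simp at hpre
        have hd : pvSW d = true := by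
          by_contra hdf
          rw [List.takeWhile_cons_of_pos hc,
              List.takeWhile_cons_of_neg (by simpa using hdf)] at hpre
          simp at hpre
        have hchead : PySem.Chars.isspace c = false := pv_strip_head hs
        have hsign' : (decide (c = '+') || decide (c = '-')) = true := by
          cases hb : (decide (c = '+') || decide (c = '-')) with
          | true => rfl
          | false =>
            exfalso
            simp only [Bool.or_eq_false_iff, decide_eq_false_iff_not] at hb
            simp [pvSW, hchead, hb.1, hb.2] at hc
        simp only [hsign', if_true]
        exact pv_strIsdigit_sw_head hd

-- ===== VERDICT (by name: the statements are the Claim_ definitions above) =====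
theorem isnum_spec : Claim_unchanged_isnum := by
  intro n hdom _
  unfold Spec_isnum
  intro hnD
  exact pv_main n (fun hsem => hnD ((pv_D_iff n hdom).mpr hsem))

theorem isnum_changed : Claim_changed_isnum := by
  unfold Claim_changed_isnum; decide

theorem isnum_tight : Claim_exact_isnum := by
  intro n hdom _ hD
  obtain ⟨hA, hB⟩ := pv_D_values n ((pv_D_iff n hdom).mp hD)
  rw [hA, hB]; simp
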